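-- pv_equiv track=rewrite | github.com/Honzakotatko/python_prakticke_vsechny | Python_Maturita_prakticke/15-graf.py | longest_path_via
-- ===== SOURCE A (Python) =====
-- def find_all_paths(graph, start, end, path=None):
--     """
--     Rekurzivní hledání všech jednoduchých (acyklických) cest
--     mezi dvěma městy. Vrací seznam cest, kde každá cesta je list měst.
--     """
--     if path is None:
--         path = []
--     path = path + [start]
--     if start == end:
--         return [path]
--     if start not in graph:
--         return []
--     paths = []
--     for neighbor, _ in graph[start]:
--         if neighbor not in path:
--             newpaths = find_all_paths(graph, neighbor, end, path)
--             for newpath in newpaths: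
--                 paths.append(newpath)
--     return paths
--
-- def path_distance(graph, path):
--     """
--     Vypočítá celkovou vzdálenost pro danou cestu (list měst).
--     """
--     distance = 0
--     for i in range(len(path) - 1):
--         for neighbor, weight in graph[path[i]]:
--             if neighbor == path[i+1]:
--                 distance += weight
--                 break
--     return distance
--
-- def longest_path_via(graph, start, via, end):
--     """
--     Najde nejdelší jednoduchou cestu mezi 'start' a 'end',
--     která obsahuje 'via'. Prohledává všechny cesty (může být pomalé).
--     """
--     all_paths = find_all_paths(graph, start, end)
--     # Filtrujeme jen ty, které obsahují 'via'
--     valid_paths = [p for p in all_paths if via in p]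
--     if not valid_paths:
--         return None, None
--     # Vyber cestu s maximální vzdáleností
--     longest = max(valid_paths, key=lambda p: path_distance(graph, p)) #tady zmenit maxna min MATURITA
--     max_distance = path_distance(graph, longest)
--     return longest, max_distance
-- ===== SOURCE B (Python) =====
-- def longest_path_via(graph, start, via, end):
--     """Single recursive DFS carrying the current path and a running best
--     (longest, distance) accumulator; no intermediate list of all paths."""
--     def dist(path):
--         total = 0
--         for a, b in zip(path, path[1:]):
--             total += next((w for n, w in graph[a] if n == b), 0)
--         return total
--
--     best = [None, None]
--
--     def dfs(node, path):
--         path = path + [node]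
--         if node == end:
--             if via in path:
--                 d = dist(path)
--                 if best[0] is None or d > best[1]:
--                     best[0], best[1] = path, d
--             return
--         for neighbor, _ in graph.get(node, ()):
--             if neighbor not in path:
--                 dfs(neighbor, path)
--
--     dfs(start, [])
--     return best[0], best[1]
-- ===== Notes on version B (the rewrite author's own statement) =====
-- stated objective: simpler
-- what changed: A enumerates the full list of all simple paths, filters it by 'via', then scans it twice more (max by distance, then recompute the distance); B is a single recursive DFS that threads a best-(path, distance) accumulator, updating it on strict improvement when a complete path through 'via' is reached, so no path list is ever materialized.
import Mathlib
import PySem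

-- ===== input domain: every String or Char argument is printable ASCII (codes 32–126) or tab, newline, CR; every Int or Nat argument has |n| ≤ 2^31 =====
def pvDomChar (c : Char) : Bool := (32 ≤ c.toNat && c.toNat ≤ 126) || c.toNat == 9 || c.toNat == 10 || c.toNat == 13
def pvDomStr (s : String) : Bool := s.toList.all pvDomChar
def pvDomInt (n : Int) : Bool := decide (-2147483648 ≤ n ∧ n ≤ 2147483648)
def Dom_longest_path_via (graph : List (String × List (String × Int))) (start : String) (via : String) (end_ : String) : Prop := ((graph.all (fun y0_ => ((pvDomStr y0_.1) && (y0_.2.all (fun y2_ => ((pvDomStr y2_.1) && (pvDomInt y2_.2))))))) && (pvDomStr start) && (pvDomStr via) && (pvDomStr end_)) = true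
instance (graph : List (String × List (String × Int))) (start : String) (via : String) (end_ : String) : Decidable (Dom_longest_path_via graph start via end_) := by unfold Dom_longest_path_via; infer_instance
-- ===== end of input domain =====

-- B replaces A's three-pass pipeline (enumerate all paths, filter by via, max by distance)
-- with one recursive DFS threading a best-(path,distance) accumulator; objective: simpler one-pass decomposition.

-- ===== PORT A =====

-- `for neighbor, weight in graph[path[i]]: if neighbor == path[i+1]: distance += weight; break`
-- = weight of the FIRST matching edge, 0 if the loop falls through without a match
def pvEdgeW (adj : List (String × Int)) (nxt : String) : Int :=
  match adj with
  | [] => 0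
  | (n, w)::rest => if n == nxt then w else pvEdgeW rest nxt

-- path_distance: sums pvEdgeW over the adjacent pairs (path[i], path[i+1]), i = 0 .. len-2,
-- in the same order as the Python range loop.  graph[path[i]] is ported as getD _ [] : the
-- KeyError case is unreachable on the paths A feeds it (every non-final node was expanded).
def pvPathDistance (g : PySem.Dict String (List (String × Int))) : List String → Int
  | a :: b :: rest => pvEdgeW (PySem.Dict.getD g a []) b + pvPathDistance g (b :: rest)
  | _ => 0

-- find_all_paths; Python recursion made structural with a fuel argument.  The fuel
-- graph.length + 1 passed by longest_path_via is never exhausted (the path holds distinct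
-- graph keys), so the 0-fuel branch is a totality guard only, not an algorithm switch.
def pvFindAllPaths (g : PySem.Dict String (List (String × Int))) (end_ : String) :
    Nat → String → List String → List (List String)
  | 0, _, _ => []
  | fuel+1, start, path =>
    let path := path ++ [start]
    if start == end_ then [path]
    else
      match PySem.Dict.get? g start with
      | none => []   -- start not in graph
      | some adj =>
        adj.foldl (fun paths nw =>
          if nw.1 ∈ path then paths
          else paths ++ pvFindAllPaths g end_ fuel nw.1 path) []

def longest_path_via (graph : List (String × List (String × Int))) (start : String) (via : String) (end_ : String) : Option (List String) × Option Int :=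
  let g : PySem.Dict String (List (String × Int)) := ⟨graph⟩
  let all_paths := pvFindAllPaths g end_ (graph.length + 1) start []
  let valid_paths := all_paths.filter (fun p => decide (via ∈ p))
  if valid_paths.isEmpty then (none, none)
  else
    match PySem.List.max? valid_paths (fun p => pvPathDistance g p) with
    | none => (none, none)   -- unreachable: valid_paths ≠ []
    | some longest => (some longest, some (pvPathDistance g longest))

-- ===== PORT B =====

-- dist: fold over zip(path, path[1:]), adding the first matching edge weight (next(…, 0))
def pvAltDist (g : PySem.Dict String (List (String × Int))) (path : List String) : Int :=
  (path.zip path.tail).foldl (fun t ab =>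
    t + (match (PySem.Dict.getD g ab.1 []).find? (fun nw => nw.1 == ab.2) with
         | some nw => nw.2
         | none => 0)) 0

-- dfs: threads the best (path, distance) accumulator; same fuel discipline as port A
def pvDfs (g : PySem.Dict String (List (String × Int))) (via end_ : String) :
    Nat → String → List String → Option (List String × Int) → Option (List String × Int)
  | 0, _, _, best => best
  | fuel+1, node, path, best =>
    let path := path ++ [node]
    if node == end_ then
      if via ∈ path then
        let d := pvAltDist g path
        match best with
        | none => some (path, d)
        | some (bp, bd) => if bd < d then some (path, d) else some (bp, bd)
      else best
    else
      (PySem.Dict.getD g node []).foldl (fun best nw =>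
        if nw.1 ∈ path then best else pvDfs g via end_ fuel nw.1 path best) best

def longest_path_via_alt (graph : List (String × List (String × Int))) (start : String) (via : String) (end_ : String) : Option (List String) × Option Int :=
  let g : PySem.Dict String (List (String × Int)) := ⟨graph⟩
  match pvDfs g via end_ (graph.length + 1) start [] none with
  | none => (none, none)
  | some (p, d) => (some p, some d)

-- ===== PRECONDITION & SPEC =====
def Spec_longest_path_via (graph : List (String × List (String × Int))) (start : String) (via : String) (end_ : String) (out : Option (List String) × Option Int) : Prop := out = longest_path_via_alt graph start via end_
instance (graph : List (String × List (String × Int))) (start : String) (via : String) (end_ : String) (out : Option (List String) × Option Int) : Decidable (Spec_longest_path_via graph start via end_ out) := by unfold Spec_longest_path_via; infer_instance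

-- ===== CLAIM (what is proved, stated in full; the proofs are below) =====
def Claim_equal_longest_path_via : Prop := ∀ (graph : List (String × List (String × Int))) (start : String) (via : String) (end_ : String), Dom_longest_path_via graph start via end_ → Spec_longest_path_via graph start via end_ (longest_path_via graph start via end_)

-- ===== LEMMAS AND PROOFS =====

-- B's next(…, 0) first-match lookup = A's break-loop first-match lookup
theorem pvFind_eq_edgeW (adj : List (String × Int)) (b : String) :
    (match adj.find? (fun nw => nw.1 == b) with
     | some nw => nw.2
     | none => (0:Int)) = pvEdgeW adj b := by
  induction adj with
  | nil => simp [pvEdgeW]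
  | cons hd tl ih =>
    by_cases h : hd.1 == b <;> simp [pvEdgeW, List.find?, h, ih]

-- A's distance is the sum of first-match edge weights over the adjacent pairs
theorem pvPathDistance_eq_sum (g : PySem.Dict String (List (String × Int))) (path : List String) :
    ((path.zip path.tail).map (fun ab => pvEdgeW (PySem.Dict.getD g ab.1 []) ab.2)).sum
      = pvPathDistance g path := by
  induction path with
  | nil => simp [pvPathDistance]
  | cons a t ih =>
    cases t with
    | nil => simp [pvPathDistance]
    | cons b r =>
      simp only [List.tail_cons, List.zip_cons_cons, List.map_cons, List.sum_cons] at ih ⊢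
      rw [ih]
      simp [pvPathDistance]

-- B's distance = A's path_distance
theorem pvAltDist_eq (g : PySem.Dict String (List (String × Int))) (path : List String) :
    pvAltDist g path = pvPathDistance g path := by
  unfold pvAltDist
  rw [PySem.List.foldl_add]
  simp only [pvFind_eq_edgeW, zero_add]
  exact pvPathDistance_eq_sum g path

-- the best-accumulator update B performs on one completed path
def pvUpd (g : PySem.Dict String (List (String × Int))) (via : String)
    (best : Option (List String × Int)) (p : List String) : Option (List String × Int) :=
  if via ∈ p then
    match best with
    | none => some (p, pvPathDistance g p)
    | some (bp, bd) => if bd < pvPathDistance g p then some (p, pvPathDistance g p) else some (bp, bd)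
  else best

-- folding pvUpd over a nested append-fold = folding the recursive results one by one
theorem pvFold_nested (g : PySem.Dict String (List (String × Int))) (via : String)
    (adj : List (String × Int)) (c : String × Int → Prop) [DecidablePred c] (F : String × Int → List (List String))
    (ps0 : List (List String)) (best : Option (List String × Int)) :
    List.foldl (pvUpd g via) best (adj.foldl (fun ps nw => if c nw then ps else ps ++ F nw) ps0)
      = adj.foldl (fun b nw => if c nw then b else List.foldl (pvUpd g via) b (F nw))
          (List.foldl (pvUpd g via) best ps0) := by
  induction adj generalizing ps0 best with
  | nil => simp
  | cons nw tl ih =>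
    by_cases h : c nw
    · simp [List.foldl_cons, h, ih]
    · simp [List.foldl_cons, h, ih, List.foldl_append]

-- main invariant: B's dfs = fold of pvUpd over A's list of all paths (any fuel)
theorem pvDfs_eq_fold (g : PySem.Dict String (List (String × Int))) (via end_ : String)
    (fuel : Nat) (node : String) (path : List String) (best : Option (List String × Int)) :
    pvDfs g via end_ fuel node path best
      = List.foldl (pvUpd g via) best (pvFindAllPaths g end_ fuel node path) := by
  induction fuel generalizing node path best with
  | zero => simp [pvDfs, pvFindAllPaths]
  | succ fuel ih =>
    simp only [pvDfs, pvFindAllPaths]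
    by_cases hend : node == end_
    · simp [hend, pvUpd, pvAltDist_eq]
    · simp only [hend, if_false, Bool.false_eq_true]
      cases hg : PySem.Dict.get? g node with
      | none =>
        have : PySem.Dict.getD g node [] = [] := by
          simp [PySem.Dict.getD, hg]
        simp [this]
      | some adj =>
        have : PySem.Dict.getD g node [] = adj := by
          simp [PySem.Dict.getD, hg]
        simp only [this, ih]
        rw [pvFold_nested]
        simp

-- folding the strict-improvement update = Python max's first-maximal choice, paired with its distance
theorem pvFold_max (g : PySem.Dict String (List (String × Int)))
    (l : List (List String)) (acc : Option (List String)) :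
    List.foldl (fun b p =>
        match b with
        | none => some (p, pvPathDistance g p)
        | some (bp, bd) => if bd < pvPathDistance g p then some (p, pvPathDistance g p) else some (bp, bd))
      (acc.map (fun p => (p, pvPathDistance g p))) l
      = (List.foldl (fun a x =>
          match a with
          | none => some x
          | some m => if pvPathDistance g m < pvPathDistance g x then some x else some m) acc l).map
          (fun p => (p, pvPathDistance g p)) := by
  induction l generalizing acc with
  | nil => rfl
  | cons p t ih =>
    cases acc with
    | none => simpa using ih (some p)
    | some bp =>
      simp only [List.foldl_cons, Option.map_some]
      by_cases h : pvPathDistance g bp < pvPathDistance g p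
      · simpa [h] using ih (some p)
      · simpa [h] using ih (some bp)

-- ===== VERDICT (by name: the statement is the Claim_ definition above) =====
theorem longest_path_via_spec : Claim_equal_longest_path_via := by
  intro graph start via end_ _
  show longest_path_via graph start via end_ = longest_path_via_alt graph start via end_
  unfold longest_path_via longest_path_via_alt
  simp only [pvDfs_eq_fold]
  set g : PySem.Dict String (List (String × Int)) := ⟨graph⟩ with hg
  set all := pvFindAllPaths g end_ (graph.length + 1) start [] with hall
  have hfold :
      List.foldl (pvUpd g via) none all
        = (PySem.List.max? (all.filter (fun p => decide (via ∈ p)))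
            (fun p => pvPathDistance g p)).map (fun p => (p, pvPathDistance g p)) := by
    have hq : List.foldl (pvUpd g via) none all
        = List.foldl (fun b p =>
            match b with
            | none => some (p, pvPathDistance g p)
            | some (bp, bd) => if bd < pvPathDistance g p then some (p, pvPathDistance g p) else some (bp, bd))
          none (all.filter (fun p => decide (via ∈ p))) := by
      rw [List.foldl_filter]
      congr 1
      funext b p
      by_cases h : via ∈ p <;> simp [pvUpd, h]
    rw [hq, PySem.List.max?]
    have h2 := pvFold_max g (all.filter (fun p => decide (via ∈ p))) none
    simp only [Option.map_none] at h2
    rw [h2]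
    congr 2
    funext a x
    cases a <;> rfl
  rw [hfold]
  cases hv : all.filter (fun p => decide (via ∈ p)) with
  | nil => simp [PySem.List.max?]
  | cons q t =>
    have hne : (q :: t) ≠ [] := by simp
    cases hm : PySem.List.max? (q :: t) (fun p => pvPathDistance g p) with
    | none => exact absurd ((PySem.List.max?_eq_none_iff _ _).mp hm) hne
    | some m => simp
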